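-- pv_equiv track=rewrite | github.com/jaffe59/synsemnet | synsemnet/data.py | print_interlinearized
-- ===== SOURCE A (Python) =====
-- def print_interlinearized(lines, max_tokens=20):
--     out = []
--     for l1 in zip(*lines):
--         out.append([])
--         n_tok = 0
--         for w in zip(*l1):
--             if n_tok == max_tokens:
--                 out[-1].append([[] for _ in range(len(w))])
--                 n_tok = 0
--             if len(out[-1]) == 0:
--                 out[-1].append([[] for _ in range(len(w))])
--             max_len = max([len(x) for x in w])
--             for i, x in enumerate(w):
--                 out[-1][-1][i].append(x + ' ' * (max_len - len(x)))
--             n_tok += 1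
--
--     string = ''
--     for l1 in out:
--         for l2 in l1:
--             for x in l2:
--                 string += ' '.join(x) + '\n'
--         string += '\n'
--
--     return string
-- ===== SOURCE B (Python) =====
-- def print_interlinearized(lines, max_tokens=20):
--     parts = []
--     for sent in zip(*lines):
--         cols = []
--         for w in zip(*sent):
--             m = max(len(x) for x in w)
--             cols.append([x + ' ' * (m - len(x)) for x in w])
--         rest = cols
--         while rest:
--             chunk = rest[:max_tokens]
--             rest = rest[max_tokens:]
--             for row in zip(*chunk):
--                 parts.append(' '.join(row) + '\n')
--         parts.append('\n')
--     return ''.join(parts)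
-- ===== Notes on version B (the rewrite author's own statement) =====
-- stated objective: simpler
-- what changed: Replaces A's running n_tok counter, empty-chunk sentinel and repeated mutation of out[-1][-1][i] with a direct pipeline per sentence: build the padded columns once, slice them off the front in chunks of max_tokens, and emit each chunk's rows via zip; Pre_ excludes non-positive max_tokens, a meaningless chunk size on which A's everything-in-one-block output is an accident of its counter and B's front-slicing loop does not terminate once a sentence has words (on word-less inputs both agree, but nothing is claimed for a non-positive chunk size).
-- outside the precondition, e.g. on print_interlinearized([[['ab']]], 0): A returns 'ab\n\n', B does not finish within the time limit; on print_interlinearized([[['ab']]], -1): A returns 'ab\n\n', B does not finish within the time limit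
import Mathlib
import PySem

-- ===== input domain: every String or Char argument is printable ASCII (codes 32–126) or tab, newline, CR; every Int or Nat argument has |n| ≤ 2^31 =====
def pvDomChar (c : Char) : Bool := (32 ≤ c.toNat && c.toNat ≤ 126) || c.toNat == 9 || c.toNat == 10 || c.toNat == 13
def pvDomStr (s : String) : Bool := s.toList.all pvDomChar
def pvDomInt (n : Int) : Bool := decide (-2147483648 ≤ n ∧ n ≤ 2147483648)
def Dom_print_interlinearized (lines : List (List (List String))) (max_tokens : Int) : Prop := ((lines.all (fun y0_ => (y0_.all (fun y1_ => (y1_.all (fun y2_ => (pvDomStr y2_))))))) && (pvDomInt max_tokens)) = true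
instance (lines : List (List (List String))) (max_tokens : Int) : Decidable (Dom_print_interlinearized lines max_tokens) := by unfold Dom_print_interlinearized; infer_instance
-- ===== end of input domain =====

-- B builds the padded columns per sentence once and slices them off the front in chunks,
-- instead of A's running token counter and last-element mutation (objective: simpler).

-- ===== PORT A =====
-- Python's zip(*ls): heads of all lists (none if any is empty)…
def pyHeads {α : Type} : List (List α) → Option (List α)
  | [] => some []
  | [] :: _ => none
  | (a :: _) :: rest => (pyHeads rest).map (a :: ·)

-- …iterated; fuel = length of the first list bounds the number of rows (min length ≤ first length)
def pyZipGo {α : Type} : Nat → List (List α) → List (List α)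
  | 0, _ => []
  | fuel + 1, ls =>
    match pyHeads ls with
    | none => []
    | some hds => hds :: pyZipGo fuel (ls.map List.tail)

def pyZip {α : Type} (ls : List (List α)) : List (List α) :=
  match ls with
  | [] => []
  | l :: rest => pyZipGo l.length (l :: rest)

-- out[-1] = f(out[-1]) on a Python list
def updLast {α : Type} (f : α → α) : List α → List α
  | [] => []
  | [a] => [f a]
  | a :: b :: rest => a :: updLast f (b :: rest)

-- body of A's inner `for w in zip(*l1)` loop; state = (out[-1] so far, n_tok).
-- `max([len(x) for x in w])` is ported total via max?/getD (w is never empty where the loop runs,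
-- so Python's max never raises here); `out[-1][-1][i].append(...)` is List.modify at i (always in range).
def pvAStep (max_tokens : Int) (st : List (List (List (List Char))) × Int) (w : List (List Char)) :
    List (List (List (List Char))) × Int :=
  let p := if st.2 == max_tokens then (st.1 ++ [w.map (fun _ => ([] : List (List Char)))], (0 : Int)) else st
  let sent := if p.1.length == 0 then p.1 ++ [w.map (fun _ => ([] : List (List Char)))] else p.1
  let m := ((w.map List.length).max?).getD 0
  let sent := (PySem.List.enumerate w).foldl
    (fun sent ix => updLast (fun chunk => chunk.modify ix.1.toNat (fun lst => lst ++ [ix.2 ++ List.replicate (m - ix.2.length) ' '])) sent) sent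
  (sent, p.2 + 1)

-- strings are carried as List Char (String.toList at entry, String.ofList at exit); `string += …` is List append
def print_interlinearized (lines : List (List (List String))) (max_tokens : Int) : String :=
  let L := lines.map (fun layer => layer.map (fun sent => sent.map String.toList))
  let out := (pyZip L).foldl (fun out l1 => out ++ [((pyZip l1).foldl (pvAStep max_tokens) ([], 0)).1]) []
  let s := out.foldl (fun s l1 =>
    (l1.foldl (fun s l2 => l2.foldl (fun s x => s ++ PySem.Chars.join [' '] x ++ ['\n']) s) s) ++ ['\n']) ([] : List Char)
  String.ofList s

-- ===== PORT B =====
-- Source B's `while rest: chunk = rest[:max_tokens]; rest = rest[max_tokens:]; …`: under Pre_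
-- (max_tokens ≥ 1, called with k = max_tokens-1) the slices are take/drop, and the rows of
-- each chunk are emitted as the chunks come off the front
def bChunks {β : Type} (k : Nat) (xs : List β) : List (List β) :=
  match xs with
  | [] => []
  | c :: cs => (c :: cs).take (k + 1) :: bChunks k (cs.drop k)
termination_by xs.length
decreasing_by simp

def print_interlinearized_alt (lines : List (List (List String))) (max_tokens : Int) : String :=
  let L := lines.map (fun layer => layer.map (fun sent => sent.map String.toList))
  let parts := (pyZip L).foldl (fun parts sent =>
    let cols := (pyZip sent).foldl (fun cols w =>
      let m := ((w.map List.length).max?).getD 0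
      cols ++ [w.map (fun x => x ++ List.replicate (m - x.length) ' ')]) []
    let parts := (bChunks (max_tokens.toNat - 1) cols).foldl (fun parts ch =>
      (pyZip ch).foldl (fun parts row => parts ++ [PySem.Chars.join [' '] row ++ ['\n']]) parts) parts
    parts ++ [['\n']]) ([] : List (List Char))
  String.ofList parts.flatten

-- ===== PRECONDITION & SPEC =====
-- Pre_ excludes non-positive max_tokens, a meaningless chunk size: there A returns everything
-- in one block only because its counter can never fire (an accident of the implementation),
-- while B's front-slicing loop does not terminate once a sentence has words (on word-less
-- inputs both agree, but nothing is claimed for a non-positive chunk size).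
def Pre_print_interlinearized (lines : List (List (List String))) (max_tokens : Int) : Prop := 1 ≤ max_tokens
instance (lines : List (List (List String))) (max_tokens : Int) : Decidable (Pre_print_interlinearized lines max_tokens) := by unfold Pre_print_interlinearized; infer_instance

def pvWitness_print_interlinearized : List (List (List String)) × Int := ([[["ab", "c"], ["xyz", "q"]]], 2)

def Spec_print_interlinearized (lines : List (List (List String))) (max_tokens : Int) (out : String) : Prop := out = print_interlinearized_alt lines max_tokens
instance (lines : List (List (List String))) (max_tokens : Int) (out : String) : Decidable (Spec_print_interlinearized lines max_tokens out) := by unfold Spec_print_interlinearized; infer_instance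

-- ===== CLAIM (what is proved, stated in full; the proofs are below) =====
def Claim_equal_print_interlinearized : Prop := ∀ (lines : List (List (List String))) (max_tokens : Int), Dom_print_interlinearized lines max_tokens → Pre_print_interlinearized lines max_tokens → Spec_print_interlinearized lines max_tokens (print_interlinearized lines max_tokens)

-- ===== LEMMAS AND PROOFS =====

-- spec-level vocabulary
def transp (r : Nat) (g : List (List (List Char))) : List (List (List Char)) :=
  (List.range r).map (fun i => g.map (fun c => c.getD i []))

def pcolOf (w : List (List Char)) : List (List Char) :=
  w.map (fun x => x ++ List.replicate ((((w.map List.length).max?).getD 0) - x.length) ' ')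

def renderRow (x : List (List Char)) : List Char := PySem.Chars.join [' '] x ++ ['\n']

-- A's counter-based grouping, abstracted
def grpGo (k : Int) (g : List (List (List Char))) : List (List (List Char)) → List (List (List (List Char)))
  | [] => [g]
  | c :: cs => if (g.length : Int) == k then g :: grpGo k [c] cs else grpGo k (g ++ [c]) cs

def grp (k : Int) : List (List (List Char)) → List (List (List (List Char)))
  | [] => []
  | c :: cs => grpGo k [c] cs

def chunksSpec (mt : Int) (pcols : List (List (List Char))) : List (List (List (List Char))) :=
  bChunks (mt.toNat - 1) pcols

def renderSent (mt : Int) (r : Nat) (l1 : List (List (List Char))) : List Char :=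
  ((chunksSpec mt ((pyZip l1).map pcolOf)).flatMap (fun g => (transp r g).flatMap renderRow)) ++ ['\n']

def partsOfB (mt : Int) (l1 : List (List (List Char))) : List (List Char) :=
  (chunksSpec mt ((pyZip l1).map pcolOf)).flatMap (fun ch => (pyZip ch).map renderRow) ++ [['\n']]

-- pyZip basics
theorem pyHeads_eq_some {α : Type} (ls : List (List α)) (h : ∀ c ∈ ls, c ≠ []) (d : α) :
    pyHeads ls = some (ls.map (fun c => c.getD 0 d)) := by
  induction ls with
  | nil => rfl
  | cons c rest ih =>
    match c, h c (by simp) with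
    | a :: t, _ =>
      simp only [pyHeads, ih (fun c hc => h c (by simp [hc])), Option.map_some, List.map_cons]
      rfl

theorem pyHeads_none {α : Type} (ls : List (List α)) (c : List α) (hc : c ∈ ls) (he : c = []) :
    pyHeads ls = none := by
  induction ls with
  | nil => simp at hc
  | cons c' rest ih =>
    rcases List.mem_cons.mp hc with h | h
    · subst h; subst he; rfl
    · match c' with
      | [] => rfl
      | a :: t => simp only [pyHeads, ih h, Option.map_none]

theorem pyHeads_length {α : Type} (ls : List (List α)) (hds : List α) (h : pyHeads ls = some hds) :
    hds.length = ls.length := by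
  induction ls generalizing hds with
  | nil => simp [pyHeads] at h; simp [← h]
  | cons c rest ih =>
    match c with
    | [] => simp [pyHeads] at h
    | a :: t =>
      simp only [pyHeads, Option.map_eq_some_iff] at h
      obtain ⟨hds', h1, h2⟩ := h
      simp [← h2, ih hds' h1]

theorem length_of_mem_pyZipGo {α : Type} (fuel : Nat) :
    ∀ (ls : List (List α)) (w : List α), w ∈ pyZipGo fuel ls → w.length = ls.length := by
  induction fuel with
  | zero => intro ls w h; simp [pyZipGo] at h
  | succ n ih =>
    intro ls w h
    simp only [pyZipGo] at h
    match hh : pyHeads ls with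
    | none => rw [hh] at h; simp at h
    | some hds =>
      rw [hh] at h
      rcases List.mem_cons.mp h with h1 | h1
      · subst h1; exact pyHeads_length ls w hh
      · simpa using ih (ls.map List.tail) w h1

theorem length_of_mem_pyZip {α : Type} (ls : List (List α)) (w : List α) (h : w ∈ pyZip ls) :
    w.length = ls.length := by
  match ls with
  | [] => simp [pyZip] at h
  | l :: rest => exact length_of_mem_pyZipGo l.length _ w h

theorem pyZipGo_eq_transp {α : Type} (d : α) :
    ∀ (r : Nat) (fuel : Nat) (ls : List (List α)), ls ≠ [] → (∀ c ∈ ls, c.length = r) → r ≤ fuel →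
    pyZipGo fuel ls = (List.range r).map (fun i => ls.map (fun c => c.getD i d)) := by
  intro r
  induction r with
  | zero =>
    intro fuel ls hne hlen _
    match ls with
    | c :: rest =>
      have : c = [] := List.eq_nil_of_length_eq_zero (hlen c (by simp))
      match fuel with
      | 0 => simp [pyZipGo]
      | n + 1 => simp only [pyZipGo, pyHeads_none (c :: rest) c (by simp) this]; simp
  | succ n ih =>
    intro fuel ls hne hlen hfu
    match fuel with
    | fu + 1 =>
      have hcne : ∀ c ∈ ls, c ≠ [] := by
        intro c hc h0; have := hlen c hc; simp [h0] at this
      rw [pyZipGo, pyHeads_eq_some ls hcne d]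
      have htl : ∀ c ∈ ls.map List.tail, c.length = n := by
        intro c hc
        obtain ⟨c', hc', rfl⟩ := List.mem_map.mp hc
        have := hlen c' hc'; simp [List.length_tail]; omega
      rw [ih fu (ls.map List.tail) (by simpa using hne) htl (by omega)]
      rw [List.range_succ_eq_map]
      simp only [List.map_cons, List.map_map]
      congr 1
      apply List.map_congr_left
      intro i _
      simp only [Function.comp]
      apply List.map_congr_left
      intro c hc
      match c, hcne c hc with
      | a :: t, _ => simp

theorem pyZip_eq_transp (ls : List (List (List Char))) (r : Nat) (hne : ls ≠ [])
    (hlen : ∀ c ∈ ls, c.length = r) : pyZip ls = transp r ls := by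
  match ls with
  | l :: rest =>
    exact pyZipGo_eq_transp [] r l.length (l :: rest) hne hlen
      (le_of_eq (hlen l (by simp)).symm)

-- updLast
theorem updLast_append_singleton {α : Type} (f : α → α) (l : List α) (a : α) :
    updLast f (l ++ [a]) = l ++ [f a] := by
  induction l with
  | nil => rfl
  | cons x xs ih =>
    match xs with
    | [] => rfl
    | y :: ys => simpa [updLast] using ih

theorem foldl_updLast {α β : Type} (h : β → α → α) (l : List β) :
    ∀ (acc : List α) (c : α),
    l.foldl (fun s a => updLast (h a) s) (acc ++ [c]) = acc ++ [l.foldl (fun c a => h a c) c] := by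
  induction l with
  | nil => intro acc c; rfl
  | cons x xs ih =>
    intro acc c
    simp only [List.foldl_cons, updLast_append_singleton]
    exact ih acc (h x c)

-- the fill loop appends one entry to every row of the last chunk
theorem foldl_enum_modify {β γ : Type} (f : β → γ) :
    ∀ (w : List β) (pre ch : List (List γ)), ch.length = w.length →
    (PySem.List.enumerate w (pre.length : Int)).foldl
      (fun ch ix => ch.modify ix.1.toNat (fun lst => lst ++ [f ix.2])) (pre ++ ch)
    = pre ++ ch.zipWith (fun lst x => lst ++ [f x]) w := by
  intro w
  induction w with
  | nil => intro pre ch h; match ch with | [] => rfl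
  | cons x xs ih =>
    intro pre ch h
    match ch with
    | c :: cs =>
      rw [PySem.List.enumerate_cons, List.foldl_cons]
      have h1 : (pre ++ c :: cs).modify pre.length (fun lst => lst ++ [f x])
          = (pre ++ [c ++ [f x]]) ++ cs := by
        rw [List.modify_eq_take_cons_drop (by simp)]
        simp
      have h2 : ((pre.length : Int)).toNat = pre.length := by simp
      rw [h2, h1]
      have h3 : ((pre ++ [c ++ [f x]]).length : Int) = (pre.length : Int) + 1 := by simp
      rw [← h3, ih (pre ++ [c ++ [f x]]) cs (by simpa using h)]
      simp

theorem transp_nil (r : Nat) : transp r [] = List.replicate r [] := by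
  simp [transp, List.map_const']

theorem length_transp (r : Nat) (g : List (List (List Char))) : (transp r g).length = r := by
  simp [transp]

theorem zip_snoc_map (r : Nat) (g : List (List (List Char))) (w : List (List Char))
    (f : List Char → List Char) (hw : w.length = r) :
    List.zipWith (fun lst x => lst ++ [f x]) (transp r g) w = transp r (g ++ [w.map f]) := by
  apply List.ext_getElem
  · simp [transp, hw]
  · intro i h1 h2
    simp only [transp, List.getElem_zipWith, List.getElem_map, List.getElem_range, List.map_append,
      List.map_cons, List.map_nil]
    congr 1
    simp only [transp, List.length_map, List.length_range] at h2
    rw [List.getD_eq_getElem (w.map f) [] (by simp; omega), List.getElem_map]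

theorem fill_step (r : Nat) (w : List (List Char)) (hw : w.length = r) (g : List (List (List Char))) :
    (PySem.List.enumerate w).foldl
      (fun ch ix => ch.modify ix.1.toNat (fun lst => lst ++ [ix.2 ++ List.replicate ((((w.map List.length).max?).getD 0) - ix.2.length) ' '])) (transp r g)
    = transp r (g ++ [pcolOf w]) := by
  have h0 : (PySem.List.enumerate w : List (Int × List Char)) = PySem.List.enumerate w (((([] : List (List (List Char))).length) : Int)) := rfl
  rw [h0, show (transp r g) = ([] : List (List (List Char))) ++ transp r g from rfl,
    foldl_enum_modify (fun x => x ++ List.replicate ((((w.map List.length).max?).getD 0) - x.length) ' ') w [] (transp r g) (by rw [length_transp, hw])]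
  rw [List.nil_append]
  exact zip_snoc_map r g w _ hw

-- A's inner loop invariant
theorem aloop_inv (mt : Int) (r : Nat) :
    ∀ (cols : List (List (List Char))), (∀ w ∈ cols, w.length = r) →
    ∀ (acc : List (List (List (List Char)))) (g : List (List (List Char))), g ≠ [] →
    (cols.foldl (pvAStep mt) (acc ++ [transp r g], (g.length : Int))).1
      = acc ++ (grpGo mt g (cols.map pcolOf)).map (transp r) := by
  intro cols
  induction cols with
  | nil => intro _ acc g _; simp [grpGo]
  | cons w ws ih =>
    intro hlen acc g hg
    have hw : w.length = r := hlen w (by simp)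
    have hmapc : w.map (fun _ => ([] : List (List Char))) = transp r [] := by
      rw [transp_nil, List.map_const', hw]
    rw [List.foldl_cons]
    by_cases hc : (g.length : Int) = mt
    · have hstep : pvAStep mt (acc ++ [transp r g], (g.length : Int)) w
          = ((acc ++ [transp r g]) ++ [transp r [pcolOf w]], (1 : Int)) := by
        simp only [pvAStep]
        rw [if_pos (beq_iff_eq.mpr hc)]
        rw [if_neg (by simp : ¬ (((acc ++ [transp r g]) ++ [w.map (fun _ => ([] : List (List Char)))]).length == 0) = true)]
        rw [hmapc, foldl_updLast, fill_step r w hw []]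
        simp
      rw [hstep, show (1 : Int) = (([pcolOf w] : List (List (List Char))).length : Int) by simp]
      rw [ih (fun v hv => hlen v (by simp [hv])) (acc ++ [transp r g]) [pcolOf w] (by simp)]
      rw [List.map_cons, grpGo, if_pos (beq_iff_eq.mpr hc), List.map_cons]
      simp
    · have hstep : pvAStep mt (acc ++ [transp r g], (g.length : Int)) w
          = (acc ++ [transp r (g ++ [pcolOf w])], ((g ++ [pcolOf w]).length : Int)) := by
        simp only [pvAStep]
        rw [if_neg (by simp [hc] : ¬ (((g.length : Int)) == mt) = true)]
        rw [if_neg (by simp : ¬ ((acc ++ [transp r g]).length == 0) = true)]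
        rw [foldl_updLast, fill_step r w hw g]
        refine congrArg₂ Prod.mk rfl ?_
        simp
      rw [hstep, ih (fun v hv => hlen v (by simp [hv])) acc (g ++ [pcolOf w]) (by simp)]
      rw [List.map_cons, grpGo, if_neg (by simp [hc] : ¬ (((g.length : Int)) == mt) = true)]

theorem aloop_eq (mt : Int) (r : Nat) (cols : List (List (List Char))) (h : ∀ w ∈ cols, w.length = r) :
    (cols.foldl (pvAStep mt) ([], 0)).1 = (grp mt (cols.map pcolOf)).map (transp r) := by
  match cols with
  | [] => rfl
  | w :: ws =>
    have hw : w.length = r := h w (by simp)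
    have hmapc : w.map (fun _ => ([] : List (List Char))) = transp r [] := by
      rw [transp_nil, List.map_const', hw]
    rw [List.foldl_cons]
    have hstep : pvAStep mt (([] : List (List (List (List Char)))), (0 : Int)) w
        = ([] ++ [transp r [pcolOf w]], (1 : Int)) := by
      by_cases hc : ((0 : Int)) = mt
      · simp only [pvAStep]
        rw [if_pos (beq_iff_eq.mpr hc)]
        rw [if_neg (by simp : ¬ ((([] : List (List (List (List Char)))) ++ [w.map (fun _ => ([] : List (List Char)))]).length == 0) = true)]
        rw [hmapc, List.nil_append, show ([transp r []] : List (List (List (List Char)))) = [] ++ [transp r []] from rfl,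
          foldl_updLast, fill_step r w hw []]
        simp
      · simp only [pvAStep]
        rw [if_neg (by simp only [beq_iff_eq]; exact hc : ¬ (((0 : Int)) == mt) = true)]
        rw [if_pos (by simp : ((([] : List (List (List (List Char)))).length == 0) = true))]
        rw [hmapc, List.nil_append, show ([transp r []] : List (List (List (List Char)))) = [] ++ [transp r []] from rfl,
          foldl_updLast, fill_step r w hw []]
        simp
    rw [hstep, show (1 : Int) = (([pcolOf w] : List (List (List Char))).length : Int) by simp]
    rw [aloop_inv mt r ws (fun v hv => h v (by simp [hv])) [] [pcolOf w] (by simp)]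
    rfl

-- bChunks equations (it is defined by well-founded recursion)
theorem bChunks_nil {β : Type} (k : Nat) : bChunks k ([] : List β) = [] := by
  rw [bChunks.eq_def]

theorem bChunks_cons {β : Type} (k : Nat) (c : β) (cs : List β) :
    bChunks k (c :: cs) = (c :: cs).take (k + 1) :: bChunks k (cs.drop k) := by
  rw [bChunks.eq_def]

-- grouping vs chunking
theorem grpGo_pos (k : Nat) (hk : 1 ≤ k) :
    ∀ (cs g : List (List (List Char))), g ≠ [] → g.length ≤ k →
    grpGo (k : Int) g cs = bChunks (k - 1) (g ++ cs) := by
  intro cs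
  induction cs with
  | nil =>
    intro g hg hgk
    match g with
    | c :: t =>
      rw [grpGo, List.append_nil, bChunks_cons]
      have hkk : k - 1 + 1 = k := by omega
      have h1 : (c :: t).take (k - 1 + 1) = c :: t := by
        apply List.take_of_length_le; rw [hkk]; exact hgk
      have h2 : t.drop (k - 1) = [] := by
        apply List.drop_eq_nil_of_le; simp at hgk ⊢; omega
      rw [h1, h2, bChunks_nil]
  | cons c cs ih =>
    intro g hg hgk
    rw [grpGo]
    by_cases hc : g.length = k
    · rw [if_pos (by simp [hc] : (((g.length : Int)) == ((k : Nat) : Int)) = true)]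
      rw [ih [c] (by simp) (by simpa using hk)]
      match g with
      | a :: t =>
        rw [show (a :: t) ++ c :: cs = a :: (t ++ c :: cs) from by simp, bChunks_cons]
        have hkk : k - 1 + 1 = k := by omega
        have h1 : (a :: (t ++ c :: cs)).take (k - 1 + 1) = a :: t := by
          rw [hkk, show (a :: (t ++ c :: cs)) = (a :: t) ++ (c :: cs) from by simp]
          exact List.take_left' hc
        have h2 : (t ++ c :: cs).drop (k - 1) = c :: cs := by
          apply List.drop_left'
          simp at hc ⊢; omega
        rw [h1, h2]
        simp
    · rw [if_neg (by simp [hc] : ¬ (((g.length : Int)) == ((k : Nat) : Int)) = true)]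
      rw [ih (g ++ [c]) (by simp) (by simp at hgk ⊢; omega)]
      simp

theorem grp_eq_chunksSpec (mt : Int) (hmt : 0 < mt) (cols : List (List (List Char))) :
    grp mt cols = chunksSpec mt cols := by
  rw [chunksSpec]
  match cols with
  | [] => rw [grp, bChunks_nil]
  | c :: cs =>
    have h1 : 1 ≤ mt.toNat := by omega
    have h2 := grpGo_pos mt.toNat h1 cs [c] (by simp) (by simpa using h1)
    rw [show ((mt.toNat : Nat) : Int) = mt from by omega] at h2
    rw [grp, h2]
    simp

-- chunk membership facts
theorem bChunks_mem {β : Type} (k : Nat) :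
    ∀ (xs : List β) (ch : List β), ch ∈ bChunks k xs → ch ≠ [] ∧ ∀ c ∈ ch, c ∈ xs := by
  intro xs
  fun_induction bChunks k xs with
  | case1 => intro ch h; simp at h
  | case2 c cs ih =>
    intro ch h
    rcases List.mem_cons.mp h with h1 | h1
    · subst h1
      constructor
      · simp
      · intro x hx; exact List.mem_of_mem_take hx
    · obtain ⟨hne, hmem⟩ := ih ch h1
      refine ⟨hne, fun x hx => ?_⟩
      exact List.mem_cons_of_mem c (List.mem_of_mem_drop (hmem x hx))

theorem chunksSpec_mem (mt : Int) (pcols : List (List (List Char))) (ch : List (List (List Char)))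
    (h : ch ∈ chunksSpec mt pcols) : ch ≠ [] ∧ ∀ c ∈ ch, c ∈ pcols := by
  rw [chunksSpec] at h
  exact bChunks_mem _ pcols ch h

theorem length_pcolOf (w : List (List Char)) : (pcolOf w).length = w.length := by
  simp [pcolOf]

theorem flatten_flatMap {α β : Type} (l : List α) (f : α → List (List β)) :
    (l.flatMap f).flatten = l.flatMap (fun x => (f x).flatten) := by
  induction l with
  | nil => rfl
  | cons x xs ih => simp [List.flatMap_cons, List.flatten_append, ih]

-- chunks of a sentence transpose back to A's stored rows
theorem pyZip_chunk (mt : Int) (r : Nat) (l1 : List (List (List Char)))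
    (hlen : ∀ w ∈ pyZip l1, w.length = r) (ch : List (List (List Char)))
    (hch : ch ∈ chunksSpec mt ((pyZip l1).map pcolOf)) : pyZip ch = transp r ch := by
  obtain ⟨hne, hmem⟩ := chunksSpec_mem mt _ ch hch
  apply pyZip_eq_transp ch r hne
  intro c hc
  obtain ⟨w, hw, rfl⟩ := List.mem_map.mp (hmem c hc)
  rw [length_pcolOf]
  exact hlen w hw

-- per-sentence renderings
theorem sentA (mt : Int) (hmt : 0 < mt) (r : Nat) (l1 : List (List (List Char)))
    (hlen : ∀ w ∈ pyZip l1, w.length = r) (s : List Char) :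
    (((pyZip l1).foldl (pvAStep mt) ([], 0)).1.foldl
      (fun s l2 => l2.foldl (fun s x => s ++ PySem.Chars.join [' '] x ++ ['\n']) s) s) ++ ['\n']
    = s ++ renderSent mt r l1 := by
  rw [aloop_eq mt r (pyZip l1) hlen, grp_eq_chunksSpec mt hmt]
  have hinner : ∀ (l2 : List (List (List Char))) (s : List Char),
      l2.foldl (fun s x => s ++ PySem.Chars.join [' '] x ++ ['\n']) s = s ++ l2.flatMap renderRow := by
    intro l2 s
    rw [PySem.List.foldl_congr_mem l2 _ (fun s x => s ++ renderRow x) s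
      (by intro acc x _; simp [renderRow])]
    exact PySem.List.foldl_append_eq_flatMap renderRow l2 s
  rw [PySem.List.foldl_congr_mem _ _ (fun s l2 => s ++ l2.flatMap renderRow) s
    (by intro acc l2 _; exact hinner l2 acc)]
  rw [PySem.List.foldl_append_eq_flatMap (fun l2 => l2.flatMap renderRow)
    ((chunksSpec mt ((pyZip l1).map pcolOf)).map (transp r)) s]
  rw [renderSent, List.flatMap_map]
  simp

theorem sentB (mt : Int) (r : Nat) (l1 : List (List (List Char)))
    (hlen : ∀ w ∈ pyZip l1, w.length = r) :
    (partsOfB mt l1).flatten = renderSent mt r l1 := by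
  rw [partsOfB, renderSent]
  rw [List.flatten_append]
  congr 1
  · rw [flatten_flatMap]
    simp only [List.flatMap_def]
    congr 1
    apply List.map_congr_left
    intro ch hch
    rw [pyZip_chunk mt r l1 hlen ch hch]

-- main assembly
theorem render_out_A (mt : Int) (hmt : 0 < mt) (r : Nat) (zl : List (List (List (List Char))))
    (hlen : ∀ l1 ∈ zl, ∀ w ∈ pyZip l1, w.length = r) :
    ((zl.map (fun l1 => ((pyZip l1).foldl (pvAStep mt) ([], 0)).1)).foldl
      (fun s l1 => (l1.foldl (fun s l2 => l2.foldl (fun s x => s ++ PySem.Chars.join [' '] x ++ ['\n']) s) s) ++ ['\n']) ([] : List Char))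
    = zl.flatMap (renderSent mt r) := by
  rw [List.foldl_map]
  rw [PySem.List.foldl_congr_mem zl _ (fun s l1 => s ++ renderSent mt r l1) []
    (by intro acc l1 hl1; exact sentA mt hmt r l1 (hlen l1 hl1) acc)]
  rw [PySem.List.foldl_append_eq_flatMap (renderSent mt r) zl []]
  simp

theorem colsB (sent : List (List (List Char))) :
    List.foldl (fun cols w => cols ++ [List.map (fun x => x ++ List.replicate ((List.map List.length w).max?.getD 0 - x.length) ' ') w]) [] (pyZip sent)
    = (pyZip sent).map pcolOf :=
  PySem.List.foldl_append_singleton_eq_map pcolOf (pyZip sent) []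

theorem chunksB (mt : Int) (X : List (List (List Char))) :
    bChunks (mt.toNat - 1) X = chunksSpec mt X := rfl

theorem main_B (mt : Int) (zl : List (List (List (List Char)))) :
    zl.foldl (fun parts sent =>
      (chunksSpec mt ((pyZip sent).map pcolOf)).foldl
        (fun parts ch => (pyZip ch).foldl (fun parts row => parts ++ [PySem.Chars.join [' '] row ++ ['\n']]) parts) parts
      ++ [['\n']]) ([] : List (List Char))
    = zl.flatMap (partsOfB mt) := by
  rw [PySem.List.foldl_congr_mem zl _ (fun parts sent => parts ++ partsOfB mt sent) []
    (by
      intro parts sent _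
      rw [PySem.List.foldl_congr_mem (chunksSpec mt ((pyZip sent).map pcolOf)) _
        (fun parts ch => parts ++ (pyZip ch).map renderRow) parts
        (by intro acc ch _
            exact PySem.List.foldl_append_singleton_eq_map renderRow (pyZip ch) acc)]
      rw [PySem.List.foldl_append_eq_flatMap (fun ch => (pyZip ch).map renderRow)
        (chunksSpec mt ((pyZip sent).map pcolOf)) parts]
      simp [partsOfB])]
  rw [PySem.List.foldl_append_eq_flatMap (partsOfB mt) zl []]
  rfl

-- ===== VERDICT (by name: the statement is the Claim_ definition above) =====
theorem print_interlinearized_spec : Claim_equal_print_interlinearized := by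
  intro lines mt _ hpre
  have hmt : 0 < mt := hpre
  unfold Spec_print_interlinearized
  simp only [print_interlinearized, print_interlinearized_alt]
  simp only [colsB, chunksB]
  set L := lines.map (fun layer => layer.map (fun sent => sent.map String.toList)) with hL
  have hlen : ∀ l1 ∈ pyZip L, ∀ w ∈ pyZip l1, w.length = L.length := by
    intro l1 h1 w h2
    rw [length_of_mem_pyZip l1 w h2, length_of_mem_pyZip L l1 h1]
  rw [PySem.List.foldl_append_singleton_eq_map (fun l1 => (List.foldl (pvAStep mt) ([], 0) (pyZip l1)).1) (pyZip L) []]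
  rw [List.nil_append, render_out_A mt hmt L.length (pyZip L) hlen, main_B mt (pyZip L), flatten_flatMap]
  congr 1
  simp only [List.flatMap_def]
  congr 1
  apply List.map_congr_left
  intro l1 hl1
  rw [sentB mt L.length l1 (hlen l1 hl1)]
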